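-- pv_equiv track=rewrite | github.com/zhaniyazh-ch/labs_and_hms | lab1/DICT_AND_SET.py | invert_dict_strict
-- ===== SOURCE A (Python) =====
-- def invert_dict_strict(d):
--     counts = {}
--     for v in d.values():
--         counts[v] = counts.get(v, 0) + 1
--     result = {}
--     for k, v in d.items():
--         if counts[v] == 1:
--             result[v] = k
--     return result
-- ===== SOURCE B (Python) =====
-- def invert_dict_strict(d):
--     result = {}
--     dup = set()
--     for k, v in d.items():
--         if v in dup:
--             continue
--         if v in result:
--             del result[v]
--             dup.add(v)
--         else:
--             result[v] = k
--     return result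
-- ===== Notes on version B (the rewrite author's own statement) =====
-- stated objective: alternative
-- what changed: Replaces the two-pass count-then-filter (build a full value-counter, then re-scan all items) with a single collision-detecting pass that maintains the inverted dict and a set of duplicated values, deleting an entry the moment its value is seen again.
import Mathlib
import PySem

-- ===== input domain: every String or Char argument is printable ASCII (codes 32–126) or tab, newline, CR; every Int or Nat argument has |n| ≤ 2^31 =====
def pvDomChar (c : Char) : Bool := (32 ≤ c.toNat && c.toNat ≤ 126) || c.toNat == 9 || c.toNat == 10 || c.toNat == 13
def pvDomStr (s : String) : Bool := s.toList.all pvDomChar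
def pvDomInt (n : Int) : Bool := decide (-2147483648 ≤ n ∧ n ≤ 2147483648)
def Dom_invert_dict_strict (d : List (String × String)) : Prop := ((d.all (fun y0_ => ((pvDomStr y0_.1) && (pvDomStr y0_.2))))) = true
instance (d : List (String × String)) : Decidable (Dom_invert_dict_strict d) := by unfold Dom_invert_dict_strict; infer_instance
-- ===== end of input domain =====

-- B replaces A's two passes (count all values, then re-scan the items keeping those with count 1)
-- by a single pass keeping an inverted dict and a set of duplicated values; objective: alternative (same cost).

-- ===== PORT A =====
-- The input dict is the association list `d` normalised by dict semantics (PySem.Dict.ofList).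
def invert_dict_strict (d : List (String × String)) : List (String × String) :=
  let dd := PySem.Dict.ofList d
  let counts : PySem.Dict String Int :=
    dd.values.foldl (fun c v => c.insert v (c.getD v 0 + 1)) PySem.Dict.empty
  -- `counts[v]` cannot raise: every v of d.items() was counted; getD is exact here.
  let result : PySem.Dict String String :=
    dd.items.foldl (fun r p => if counts.getD p.2 0 == 1 then r.insert p.2 p.1 else r)
      PySem.Dict.empty
  result.items

-- ===== PORT B =====
def pvBStep (st : PySem.Dict String String × PySem.Set String) (p : String × String) :
    PySem.Dict String String × PySem.Set String :=
  if PySem.Set.contains st.2 p.2 then st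
  else if st.1.contains p.2 then (st.1.erase p.2, PySem.Set.add st.2 p.2)
  else (st.1.insert p.2 p.1, st.2)

def invert_dict_strict_alt (d : List (String × String)) : List (String × String) :=
  (((PySem.Dict.ofList d).items.foldl pvBStep (PySem.Dict.empty, PySem.Set.empty)).1).items

-- ===== PRECONDITION & SPEC =====
def Spec_invert_dict_strict (d : List (String × String)) (out : List (String × String)) : Prop := out = invert_dict_strict_alt d
instance (d : List (String × String)) (out : List (String × String)) : Decidable (Spec_invert_dict_strict d out) := by unfold Spec_invert_dict_strict; infer_instance

-- ===== CLAIM (what is proved, stated in full; the proofs are below) =====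
def Claim_equal_invert_dict_strict : Prop := ∀ (d : List (String × String)), Dom_invert_dict_strict d → Spec_invert_dict_strict d (invert_dict_strict d)

-- ===== LEMMAS AND PROOFS =====

-- number of items of l carrying value v
def pvCnt (l : List (String × String)) (v : String) : Nat := (l.map Prod.snd).count v

-- the common specification: items whose value occurs exactly once, swapped, in order
def pvS (l : List (String × String)) : List (String × String) :=
  (l.filter (fun p => pvCnt l p.2 == 1)).map (fun p => (p.2, p.1))

lemma pvCnt_append (l : List (String × String)) (p : String × String) (v : String) :
    pvCnt (l ++ [p]) v = pvCnt l v + (if p.2 = v then 1 else 0) := by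
  simp [pvCnt, List.count_append, List.count_singleton, beq_iff_eq]

lemma pvAfold (c : String → Bool) :
    ∀ (l : List (String × String)) (r : PySem.Dict String String),
      (∀ p ∈ l, c p.2 = true → r.contains p.2 = false) →
      (∀ v, c v = true → (l.map Prod.snd).count v ≤ 1) →
      (l.foldl (fun r p => if c p.2 then r.insert p.2 p.1 else r) r).items
        = r.items ++ (l.filter (fun p => c p.2)).map (fun p => (p.2, p.1)) := by
  intro l
  induction l with
  | nil => intro r _ _; simp
  | cons p l ih =>
    intro r hfresh honce
    simp only [List.foldl_cons]
    cases hc : c p.2 with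
    | false =>
      rw [if_neg (by simp [hc])]
      rw [ih r (fun q hq h => hfresh q (List.mem_cons_of_mem _ hq) h)
            (fun v hv => le_trans (by simp [List.count_cons]) (honce v hv))]
      simp [List.filter_cons, hc]
    | true =>
      rw [if_pos (by simp [hc])]
      have hfr : r.contains p.2 = false := hfresh p (List.mem_cons_self) hc
      have hne : ∀ q ∈ l, c q.2 = true → q.2 ≠ p.2 := by
        intro q hq hcq heq
        have h1 := honce p.2 hc
        have h2 : 1 ≤ (l.map Prod.snd).count p.2 := by
          apply List.count_pos_iff.mpr
          exact heq ▸ List.mem_map_of_mem (f := Prod.snd) hq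
        simp [List.count_cons] at h1
        omega
      rw [ih (r.insert p.2 p.1)
            (by
              intro q hq hcq
              rw [PySem.Dict.contains_insert]
              have := hne q hq hcq
              simp [this, hfresh q (List.mem_cons_of_mem _ hq) hcq])
            (fun v hv => le_trans (by simp [List.count_cons]) (honce v hv))]
      rw [PySem.Dict.items_insert_of_not_contains _ _ hfr]
      simp [List.filter_cons, hc]

lemma pvA_eq_pvS (l : List (String × String)) :
    (l.foldl (fun r p =>
        if ((l.map Prod.snd).foldl
              (fun (c : PySem.Dict String Int) v => c.insert v (c.getD v 0 + 1))
              PySem.Dict.empty).getD p.2 0 == 1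
        then r.insert p.2 p.1 else r) PySem.Dict.empty).items = pvS l := by
  have hf : (fun (r : PySem.Dict String String) (p : String × String) =>
        if ((l.map Prod.snd).foldl
              (fun (c : PySem.Dict String Int) v => c.insert v (c.getD v 0 + 1))
              PySem.Dict.empty).getD p.2 0 == 1
        then r.insert p.2 p.1 else r)
      = (fun r p => if (fun v => pvCnt l v == 1) p.2 then r.insert p.2 p.1 else r) := by
    funext r p
    have h1 : ((l.map Prod.snd).foldl
          (fun (c : PySem.Dict String Int) v => c.insert v (c.getD v 0 + 1))
          PySem.Dict.empty).getD p.2 0 = ((l.map Prod.snd).count p.2 : Int) := by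
      rw [PySem.Dict.getD_foldl_insert_add_one]
      simp
    rw [h1]
    have : (((l.map Prod.snd).count p.2 : Int) == 1) = (pvCnt l p.2 == 1) := by
      simp [pvCnt, beq_iff_eq]
    rw [this]
  rw [hf, pvAfold (fun v => pvCnt l v == 1) l PySem.Dict.empty
      (by intro q _ _; simp)
      (by intro v hv; simp [pvCnt, beq_iff_eq] at hv; simp [hv])]
  simp [pvS, PySem.Dict.empty]

lemma pvMem_keys (l : List (String × String)) (v : String) :
    v ∈ (pvS l).map Prod.fst ↔ pvCnt l v = 1 := by
  simp only [pvS, List.map_map, List.mem_map, List.mem_filter, Function.comp]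
  constructor
  · rintro ⟨q, ⟨hq, hc⟩, rfl⟩
    simpa [beq_iff_eq] using hc
  · intro hc
    have hc' : (l.map Prod.snd).count v = 1 := hc
    have hm : v ∈ l.map Prod.snd := List.count_pos_iff.mp (by omega)
    obtain ⟨q, hq, rfl⟩ := List.mem_map.mp hm
    exact ⟨q, ⟨hq, by simpa [beq_iff_eq] using hc⟩, rfl⟩

lemma pvS_append (l : List (String × String)) (p : String × String) :
    pvS (l ++ [p]) =
      if pvCnt l p.2 = 0 then pvS l ++ [(p.2, p.1)]
      else if pvCnt l p.2 = 1 then (pvS l).filter (fun q => !(q.1 == p.2))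
      else pvS l := by
  have hcnt := pvCnt_append l p
  by_cases h0 : pvCnt l p.2 = 0
  · rw [if_pos h0]
    have hnomem : ∀ q ∈ l, q.2 ≠ p.2 := by
      intro q hq heq
      have : 1 ≤ pvCnt l p.2 := by
        apply List.count_pos_iff.mpr
        exact heq ▸ List.mem_map_of_mem (f := Prod.snd) hq
      omega
    unfold pvS
    rw [List.filter_append, List.filter_congr (l := l)
        (q := fun q => pvCnt l q.2 == 1)
        (by intro q hq; rw [hcnt q.2, if_neg (fun he => hnomem q hq he.symm)]; simp)]
    simp [List.filter_cons, hcnt p.2, h0]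
  · by_cases h1 : pvCnt l p.2 = 1
    · rw [if_neg h0, if_pos h1]
      have hR : (pvS l).filter (fun q => !(q.1 == p.2))
          = (l.filter (fun q => (pvCnt l q.2 == 1) && !(q.2 == p.2))).map
            (fun p => (p.2, p.1)) := by
        simp only [pvS, List.filter_map, Function.comp_def, List.filter_filter]
        congr 1
        apply List.filter_congr
        intro a _
        exact Bool.and_comm _ _
      rw [hR]
      unfold pvS
      rw [List.filter_append, List.filter_congr (l := l)
          (q := fun q => (pvCnt l q.2 == 1) && !(q.2 == p.2))
          (by
            intro q hq
            by_cases he : q.2 = p.2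
            · simp [hcnt, he, h1]
            · simp only [hcnt]
              rw [if_neg (fun x => he x.symm)]
              simp [he])]
      simp [List.filter_cons, hcnt p.2, h1]
    · rw [if_neg h0, if_neg h1]
      unfold pvS
      rw [List.filter_append, List.filter_congr (l := l)
          (q := fun q => pvCnt l q.2 == 1)
          (by
            intro q hq
            by_cases he : q.2 = p.2
            · have e1 : (pvCnt l p.2 + 1 == 1) = false := by simp; omega
              have e2 : (pvCnt l p.2 == 1) = false := by simp; omega
              simp [hcnt, he, e1, e2]
            · simp only [hcnt]
              rw [if_neg (fun x => he x.symm)]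
              simp)]
      have : ¬ (pvCnt (l ++ [p]) p.2 = 1) := by rw [hcnt p.2]; simp; omega
      simp [List.filter_cons, this]

lemma pvBfold (l : List (String × String)) :
    ((l.foldl pvBStep (PySem.Dict.empty, PySem.Set.empty)).1).items = pvS l
    ∧ (∀ v, PySem.Set.contains (l.foldl pvBStep (PySem.Dict.empty, PySem.Set.empty)).2 v = true
          ↔ 2 ≤ pvCnt l v) := by
  induction l using List.reverseRecOn with
  | nil => simp [pvS, pvCnt, PySem.Dict.empty, PySem.Set.empty, PySem.Set.contains]
  | append_singleton l p ih =>
    obtain ⟨h1, h2⟩ := ih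
    rw [List.foldl_append]
    simp only [List.foldl_cons, List.foldl_nil]
    have hresk : (l.foldl pvBStep (PySem.Dict.empty, PySem.Set.empty)).1.contains p.2 = true
        ↔ pvCnt l p.2 = 1 := by
      rw [PySem.Dict.contains_iff_mem_keys]
      simp only [PySem.Dict.keys]
      rw [h1]
      exact pvMem_keys l p.2
    have hcnt := pvCnt_append l p
    rw [pvS_append]
    by_cases hc2 : 2 ≤ pvCnt l p.2
    · have hdup : PySem.Set.contains (l.foldl pvBStep (PySem.Dict.empty, PySem.Set.empty)).2 p.2 = true :=
        (h2 p.2).mpr hc2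
      rw [pvBStep, if_pos hdup]
      refine ⟨by rw [h1, if_neg (by omega), if_neg (by omega)], ?_⟩
      intro v
      rw [h2 v, hcnt v]
      by_cases he : p.2 = v
      · subst he; simp; omega
      · simp [he]
    · by_cases hc1 : pvCnt l p.2 = 1
      · have hdup : ¬ PySem.Set.contains (l.foldl pvBStep (PySem.Dict.empty, PySem.Set.empty)).2 p.2 = true := by
          rw [h2 p.2]; omega
        rw [pvBStep, if_neg hdup, if_pos (hresk.mpr hc1)]
        constructor
        · show List.filter _ _ = _
          rw [h1, if_neg (by omega), if_pos hc1]
        · intro v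
          have : PySem.Set.contains
              (PySem.Set.add (l.foldl pvBStep (PySem.Dict.empty, PySem.Set.empty)).2 p.2) v = true
              ↔ v ∈ PySem.Set.add (l.foldl pvBStep (PySem.Dict.empty, PySem.Set.empty)).2 p.2 :=
            PySem.Set.contains_iff _ _
          rw [this, PySem.Set.mem_add, ← PySem.Set.contains_iff, h2 v, hcnt v]
          by_cases he : p.2 = v
          · subst he; simp; omega
          · have hne : ¬ v = p.2 := fun h => he h.symm
            simp [he, hne]
      · have hc0 : pvCnt l p.2 = 0 := by omega
        have hdup : ¬ PySem.Set.contains (l.foldl pvBStep (PySem.Dict.empty, PySem.Set.empty)).2 p.2 = true := by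
          rw [h2 p.2]; omega
        have hres : (l.foldl pvBStep (PySem.Dict.empty, PySem.Set.empty)).1.contains p.2 = false := by
          rw [← Bool.not_eq_true]; rw [hresk]; omega
        rw [pvBStep, if_neg hdup, if_neg (by rw [Bool.not_eq_true]; exact hres)]
        refine ⟨?_, ?_⟩
        · show PySem.Dict.items _ = _
          rw [PySem.Dict.items_insert_of_not_contains _ _ hres, h1, if_pos hc0]
        · intro v
          rw [h2 v, hcnt v]
          by_cases he : p.2 = v
          · subst he; simp; omega
          · simp [he]

-- ===== VERDICT (by name: the statement is the Claim_ definition above) =====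
theorem invert_dict_strict_spec : Claim_equal_invert_dict_strict := by
  intro d _
  show invert_dict_strict d = invert_dict_strict_alt d
  unfold invert_dict_strict invert_dict_strict_alt
  rw [(pvBfold (PySem.Dict.ofList d).items).1]
  simpa [PySem.Dict.values] using pvA_eq_pvS (PySem.Dict.ofList d).items
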